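-- pv_equiv track=rewrite | github.com/nomarlhack/noah-sast | skills/sast/tools/lint_reader_layer.py | _strip_code_blocks
-- ===== SOURCE A (Python) =====
-- def _strip_code_blocks(text: str) -> str:
--     """MD 텍스트에서 ```...``` 코드블록 내부를 공백 라인으로 대체.
--
--     헤딩 정규식이 코드블록 내부 `# 주석`을 헤딩으로 오인하지 않도록 전처리.
--     라인 수는 유지하여 라인 번호 계산 정합성 보존.
--     """
--     result = []
--     in_code = False
--     for line in text.split("\n"):
--         stripped = line.lstrip()
--         if stripped.startswith("```"):
--             in_code = not in_code
--             result.append("")  # fence 라인도 비움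
--             continue
--         if in_code:
--             result.append("")  # 코드블록 내부는 공백 라인
--         else:
--             result.append(line)
--     return "\n".join(result)
-- ===== SOURCE B (Python) =====
-- def _strip_code_blocks(text: str) -> str:
--     """Blank out markdown code-block lines: parity/prefix-count table instead of a threaded in_code flag."""
--     lines = text.split("\n")
--     fences = [ln.lstrip().startswith("```") for ln in lines]
--     prefix = []
--     c = 0
--     for f in fences:
--         prefix.append(c)
--         c += f
--     return "\n".join("" if f or p % 2 == 1 else ln
--                      for ln, f, p in zip(lines, fences, prefix))
-- ===== Notes on version B (the rewrite author's own statement) =====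
-- stated objective: alternative
-- what changed: Replaces the single stateful loop threading a mutable in_code boolean with a two-pass table construction: a fence-flag list plus a prefix fence-count, then a stateless zip pass blanking fence lines and lines with odd preceding-fence parity.
import Mathlib
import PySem

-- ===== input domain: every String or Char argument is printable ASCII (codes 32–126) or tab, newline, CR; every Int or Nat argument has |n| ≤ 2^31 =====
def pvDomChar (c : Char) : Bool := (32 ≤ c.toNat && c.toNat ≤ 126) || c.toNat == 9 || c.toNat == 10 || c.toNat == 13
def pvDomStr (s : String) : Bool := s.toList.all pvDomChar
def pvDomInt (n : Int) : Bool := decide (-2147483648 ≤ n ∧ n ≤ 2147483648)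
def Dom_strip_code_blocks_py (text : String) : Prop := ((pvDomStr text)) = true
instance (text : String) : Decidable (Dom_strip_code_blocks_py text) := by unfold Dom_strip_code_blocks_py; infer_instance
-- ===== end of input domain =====

-- B blanks code-block lines via a precomputed fence-flag/prefix-parity table instead of
-- threading a mutable in_code boolean through one loop (objective: alternative decomposition).

-- ===== PORT A =====
-- the for-loop of A: recursion over the lines carrying the in_code flag
def pvStripLoopA : List String → Bool → List String
  | [], _ => []
  | line :: rest, inCode =>
    let stripped := PySem.Str.lstrip line
    if PySem.Str.startswith stripped "```" then
      "" :: pvStripLoopA rest (!inCode)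
    else if inCode then
      "" :: pvStripLoopA rest inCode
    else
      line :: pvStripLoopA rest inCode

def strip_code_blocks_py (text : String) : String :=
  PySem.Str.join "\n" (pvStripLoopA ((PySem.Str.split? text "\n").getD []) false)

-- ===== PORT B =====
-- fences = [ln.lstrip().startswith("```") for ln in lines]
def pvFence (ln : String) : Bool := PySem.Str.startswith (PySem.Str.lstrip ln) "```"

-- the prefix-count loop of Source B: prefix.append(c); c += f
def pvPrefix : List Bool → Nat → List Nat
  | [], _ => []
  | f :: rest, c => c :: pvPrefix rest (c + (if f then 1 else 0))

def strip_code_blocks_py_alt (text : String) : String :=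
  let lines := (PySem.Str.split? text "\n").getD []
  let fences := lines.map pvFence
  let pref := pvPrefix fences 0
  PySem.Str.join "\n"
    ((lines.zip (fences.zip pref)).map
      (fun p => if p.2.1 || p.2.2 % 2 == 1 then "" else p.1))

-- ===== PRECONDITION & SPEC =====
def Spec_strip_code_blocks_py (text : String) (out : String) : Prop := out = strip_code_blocks_py_alt text
instance (text : String) (out : String) : Decidable (Spec_strip_code_blocks_py text out) := by unfold Spec_strip_code_blocks_py; infer_instance

-- ===== CLAIM (what is proved, stated in full; the proofs are below) =====
def Claim_equal_strip_code_blocks_py : Prop := ∀ (text : String), Dom_strip_code_blocks_py text → Spec_strip_code_blocks_py text (strip_code_blocks_py text)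

-- ===== LEMMAS AND PROOFS =====
-- invariant: A's in_code flag equals the parity of B's running fence count c
lemma pvStrip_eq_table (lines : List String) (c : Nat) :
    pvStripLoopA lines (decide (c % 2 = 1)) =
      ((lines.zip ((lines.map pvFence).zip (pvPrefix (lines.map pvFence) c))).map
        (fun p => if p.2.1 || p.2.2 % 2 == 1 then "" else p.1)) := by
  induction lines generalizing c with
  | nil => simp [pvStripLoopA, pvPrefix]
  | cons line rest ih =>
    simp only [List.map_cons, pvPrefix, List.zip_cons_cons]
    cases hf : pvFence line with
    | true =>
      have hs : PySem.Chars.startswith (PySem.Chars.lstrip line.toList) ['`', '`', '`'] = true := by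
        simpa [pvFence] using hf
      have h1 : pvStripLoopA (line :: rest) (decide (c % 2 = 1)) =
          "" :: pvStripLoopA rest (!decide (c % 2 = 1)) := by
        simp [pvStripLoopA, hs]
      have h2 : (!decide (c % 2 = 1)) = decide ((c + 1) % 2 = 1) := by
        rcases Nat.mod_two_eq_zero_or_one c with h | h <;> simp [Nat.add_mod, h]
      rw [h1, h2, ih (c + 1)]
      simp
    | false =>
      have hs : PySem.Chars.startswith (PySem.Chars.lstrip line.toList) ['`', '`', '`'] = false := by
        simpa [pvFence] using hf
      have h1 : pvStripLoopA (line :: rest) (decide (c % 2 = 1)) =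
          (if decide (c % 2 = 1) then "" else line) :: pvStripLoopA rest (decide (c % 2 = 1)) := by
        cases hc : decide (c % 2 = 1) <;> simp [pvStripLoopA, hs]
      rw [h1, ih c]
      simp

-- ===== VERDICT (by name: the statement is the Claim_ definition above) =====
theorem strip_code_blocks_py_spec : Claim_equal_strip_code_blocks_py := by
  intro text _
  unfold Spec_strip_code_blocks_py
  simp only [strip_code_blocks_py, strip_code_blocks_py_alt]
  rw [show (false : Bool) = decide (0 % 2 = 1) from rfl, pvStrip_eq_table]
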